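-- pv_equiv track=rewrite | github.com/annu7028/School_Work | PS10b/Nuggehalli-Ananya-PS10b.py | commonSubstrings
-- ===== SOURCE A (Python) =====
-- def split(word):
--     return [char for char in word]
--
-- def ExtractOp(lst):
--     return [item[0] for item in lst]
--
-- def ExtractIndex(lst):
--     return [item[1] for item in lst]
--
-- def commonSubstrings(x, L, a):
--
--     X = split(x)
--     #list of characters
--     curr = ''
--     #list of subStrings
--     subStrings = []
--
--     #extract operations and the x[index] into 2 seperate arrays
--     Ops = ExtractOp(a)
--     xIndex = ExtractIndex(a)
--
--     pos = 0
--
--     #iterate through Ops looking for position where it's no-op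
--     for pos in range(len(Ops)):
--         if Ops[pos] == "no-op":
--             #get the xIndex at this position
--             xPos = xIndex[pos] - 1
--             #get the letter of x at xPos
--             curr += X[xPos]
--         else:
--             if len(curr) >= L:
--                 subStrings.append(curr)
--             curr = ''
--
--     #check if curr >= L
--     if len(curr) >= L:
--         subStrings.append(curr)
--
--     return subStrings
-- ===== SOURCE B (Python) =====
-- def commonSubstrings(x, L, a):
--     # Split-then-filter pipeline: map each operation to its character (None for a
--     # separator), locate the cut positions, slice the pieces out between
--     # consecutive cuts, and keep the pieces of length >= L.
--     chars = [x[index - 1] if op == "no-op" else None for op, index in a]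
--     cuts = [j for j, c in enumerate(chars) if c is None]
--     starts = [0] + [j + 1 for j in cuts]
--     ends = cuts + [len(chars)]
--     segs = [''.join(chars[s:e]) for s, e in zip(starts, ends)]
--     return [s for s in segs if len(s) >= L]
-- ===== Notes on version B (the rewrite author's own statement) =====
-- stated objective: alternative
-- what changed: Replaces A's flag-accumulator single pass with a duplicated trailing flush by a split-then-filter pipeline: map each operation to its character (None for separators), compute the cut positions, slice the pieces out between consecutive cuts, and filter by length >= L.
import Mathlib
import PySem

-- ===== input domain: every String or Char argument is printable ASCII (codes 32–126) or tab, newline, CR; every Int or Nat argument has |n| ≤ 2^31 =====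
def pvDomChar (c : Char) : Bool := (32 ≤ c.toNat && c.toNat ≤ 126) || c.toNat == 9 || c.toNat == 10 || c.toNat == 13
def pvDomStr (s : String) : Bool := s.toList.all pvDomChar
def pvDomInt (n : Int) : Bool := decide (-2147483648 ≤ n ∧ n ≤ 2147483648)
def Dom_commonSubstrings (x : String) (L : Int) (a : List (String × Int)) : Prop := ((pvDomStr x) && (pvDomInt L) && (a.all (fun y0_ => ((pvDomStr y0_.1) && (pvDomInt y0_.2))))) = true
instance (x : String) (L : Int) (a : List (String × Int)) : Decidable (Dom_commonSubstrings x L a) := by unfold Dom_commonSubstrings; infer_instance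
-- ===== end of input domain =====

-- B replaces A's flag-accumulator single pass (with its duplicated trailing flush) by a
-- split-then-filter pipeline: map operations to characters/separators, cut at the
-- separators, keep pieces of length ≥ L (objective: alternative decomposition, same cost).

-- ===== PORT A =====
-- Python's growing string `curr` is ported as a List Char, turned into a String when appended.
def commonSubstrings (x : String) (L : Int) (a : List (String × Int)) : List String :=
  let X : List Char := x.toList
  let Ops : List String := a.map (fun item => item.1)
  let xIndex : List Int := a.map (fun item => item.2)
  let st : List Char × List String :=
    (PySem.List.pyRange 0 (PySem.List.len Ops)).foldl
      (fun st pos =>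
        if PySem.List.pyGetD Ops pos "" = "no-op" then
          -- curr += X[xIndex[pos] - 1]; pyGetD is exact under Pre_ (A raises IndexError outside it)
          (st.1 ++ [PySem.List.pyGetD X (PySem.List.pyGetD xIndex pos 0 - 1) ' '], st.2)
        else
          if L ≤ (st.1.length : Int) then ([], st.2 ++ [String.ofList st.1]) else ([], st.2))
      ([], [])
  if L ≤ (st.1.length : Int) then st.2 ++ [String.ofList st.1] else st.2

-- ===== PORT B =====
-- `chars` holds `some c` for a no-op (its character) and `none` for a separator; the
-- Python ''.join over a slice free of None is ported as filterMap id + String.ofList.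
def commonSubstrings_alt (x : String) (L : Int) (a : List (String × Int)) : List String :=
  let chars : List (Option Char) :=
    a.map (fun p => if p.1 = "no-op" then some (PySem.List.pyGetD x.toList (p.2 - 1) ' ') else none)
  -- Python's enumerate is ported via zipIdx (value, index): exact here, the indices are
  -- the nonnegative list positions, cast to Int only at the slice bounds.
  let cuts : List Nat := chars.zipIdx.filterMap (fun ce => if ce.1 = none then some ce.2 else none)
  let starts : List Nat := 0 :: cuts.map (· + 1)
  let ends : List Nat := cuts ++ [chars.length]
  let segs : List String :=
    (starts.zip ends).map (fun se =>
      String.ofList ((PySem.List.slice chars (some (se.1 : Int)) (some (se.2 : Int))).filterMap id))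
  segs.filter (fun s => L ≤ (s.toList.length : Int))

-- ===== PRECONDITION & SPEC =====
-- Pre_ excludes exactly the inputs where A raises IndexError: a "no-op" entry whose
-- index-1 is out of Python range for x (B raises there too).
def Pre_commonSubstrings (x : String) (L : Int) (a : List (String × Int)) : Prop :=
  ∀ p ∈ a, p.1 = "no-op" → PySem.Raise.InRange x.toList.length (p.2 - 1)
instance (x : String) (L : Int) (a : List (String × Int)) : Decidable (Pre_commonSubstrings x L a) := by
  unfold Pre_commonSubstrings; infer_instance

def pvWitness_commonSubstrings : String × Int × (List (String × Int)) :=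
  ("ab", 1, [("no-op", 1), ("del", 0), ("no-op", 2), ("no-op", 1)])

def Spec_commonSubstrings (x : String) (L : Int) (a : List (String × Int)) (out : List String) : Prop := out = commonSubstrings_alt x L a
instance (x : String) (L : Int) (a : List (String × Int)) (out : List String) : Decidable (Spec_commonSubstrings x L a out) := by unfold Spec_commonSubstrings; infer_instance

-- ===== CLAIM (what is proved, stated in full; the proofs are below) =====
def Claim_equal_commonSubstrings : Prop := ∀ (x : String) (L : Int) (a : List (String × Int)), Dom_commonSubstrings x L a → Pre_commonSubstrings x L a → Spec_commonSubstrings x L a (commonSubstrings x L a)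

-- ===== LEMMAS AND PROOFS =====

-- The pieces of a char/separator list, split at every separator, with `curr` prefixed
-- to the first piece (a left-to-right reading of both programs' segmentation).
def pvSegsFrom (curr : List Char) : List (Option Char) → List (List Char)
  | [] => [curr]
  | none :: t => curr :: pvSegsFrom [] t
  | some c :: t => pvSegsFrom (curr ++ [c]) t

-- A's loop body, on a (op, index) pair.
def pvStep (X : List Char) (L : Int) (st : List Char × List String) (p : String × Int) : List Char × List String :=
  if p.1 = "no-op" then (st.1 ++ [PySem.List.pyGetD X (p.2 - 1) ' '], st.2)
  else if L ≤ (st.1.length : Int) then ([], st.2 ++ [String.ofList st.1]) else ([], st.2)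

def pvChars (X : List Char) (a : List (String × Int)) : List (Option Char) :=
  a.map (fun p => if p.1 = "no-op" then some (PySem.List.pyGetD X (p.2 - 1) ' ') else none)

-- Stage 1: A's indexed range loop is the fold of pvStep over a.
theorem pv_stage1 (X : List Char) (L : Int) (a : List (String × Int)) (init : List Char × List String) :
    (PySem.List.pyRange 0 (PySem.List.len (a.map (fun item => item.1)))).foldl
      (fun st pos =>
        if PySem.List.pyGetD (a.map (fun item => item.1)) pos "" = "no-op" then
          (st.1 ++ [PySem.List.pyGetD X (PySem.List.pyGetD (a.map (fun item => item.2)) pos 0 - 1) ' '], st.2)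
        else
          if L ≤ (st.1.length : Int) then ([], st.2 ++ [String.ofList st.1]) else ([], st.2))
      init
    = a.foldl (pvStep X L) init := by
  have h1 : ∀ pos : Int, PySem.List.pyGetD (a.map (fun item => item.1)) pos "" =
      (PySem.List.pyGetD a pos ("", (0:Int))).1 :=
    fun pos => PySem.List.pyGetD_map (fun item => item.1) a pos ("", (0:Int))
  have h2 : ∀ pos : Int, PySem.List.pyGetD (a.map (fun item => item.2)) pos 0 =
      (PySem.List.pyGetD a pos ("", (0:Int))).2 :=
    fun pos => PySem.List.pyGetD_map (fun item => item.2) a pos ("", (0:Int))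
  have hlen : PySem.List.len (a.map (fun item => item.1)) = PySem.List.len a := by
    simp [PySem.List.len_eq]
  rw [hlen]
  simp only [h1, h2]
  have := PySem.List.foldl_pyRange_pyGetD a ("", (0:Int)) (pvStep X L) init (a := 0) le_rfl
  simpa [pvStep] using this

-- Stage 2: folding pvStep then flushing yields the kept pieces of pvChars.
theorem pv_stage2 (X : List Char) (L : Int) :
    ∀ (a : List (String × Int)) (curr : List Char) (subs : List String),
    (if L ≤ ((a.foldl (pvStep X L) (curr, subs)).1.length : Int)
     then (a.foldl (pvStep X L) (curr, subs)).2 ++ [String.ofList (a.foldl (pvStep X L) (curr, subs)).1]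
     else (a.foldl (pvStep X L) (curr, subs)).2)
    = subs ++ ((pvSegsFrom curr (pvChars X a)).filter
        (fun p => L ≤ (p.length : Int))).map String.ofList := by
  intro a
  induction a with
  | nil =>
    intro curr subs
    simp only [List.foldl_nil, pvChars, List.map_nil, pvSegsFrom]
    split_ifs with h <;> simp [List.filter, h]
  | cons p t ih =>
    intro curr subs
    simp only [List.foldl_cons]
    rw [show pvChars X (p :: t)
        = (if p.1 = "no-op" then some (PySem.List.pyGetD X (p.2 - 1) ' ') else none) :: pvChars X t from rfl]
    by_cases hp : p.1 = "no-op"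
    · rw [if_pos hp, show pvStep X L (curr, subs) p
          = (curr ++ [PySem.List.pyGetD X (p.2 - 1) ' '], subs) by simp [pvStep, hp]]
      rw [show pvSegsFrom curr (some (PySem.List.pyGetD X (p.2 - 1) ' ') :: pvChars X t)
          = pvSegsFrom (curr ++ [PySem.List.pyGetD X (p.2 - 1) ' ']) (pvChars X t) from rfl]
      exact ih _ subs
    · rw [if_neg hp, show pvSegsFrom curr (none :: pvChars X t)
          = curr :: pvSegsFrom [] (pvChars X t) from rfl]
      by_cases h : L ≤ (curr.length : Int)
      · rw [show pvStep X L (curr, subs) p = ([], subs ++ [String.ofList curr]) by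
          simp [pvStep, hp, h]]
        rw [List.filter_cons_of_pos (by simpa using h), List.map_cons,
          ih [] (subs ++ [String.ofList curr])]
        simp
      · rw [show pvStep X L (curr, subs) p = ([], subs) by simp [pvStep, hp, h]]
        rw [List.filter_cons_of_neg (by simpa using h)]
        exact ih [] subs

-- pvSegsFrom with an accumulator just prefixes the accumulator to the first piece.
theorem pvSegsFrom_eq : ∀ (cs : List (Option Char)) (curr : List Char),
    pvSegsFrom curr cs = (curr ++ (pvSegsFrom [] cs).headI) :: (pvSegsFrom [] cs).tail := by
  intro cs
  induction cs with
  | nil => intro curr; simp [pvSegsFrom]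
  | cons o t ih =>
    intro curr
    cases o with
    | none => simp [pvSegsFrom]
    | some c =>
      show pvSegsFrom (curr ++ [c]) t = _
      rw [ih (curr ++ [c])]
      have : pvSegsFrom [] (some c :: t) = pvSegsFrom [c] t := rfl
      rw [this, ih [c]]
      simp

-- index shift for the enumerate port
theorem pv_cuts_shift : ∀ (l : List (Option Char)) (n : Nat),
    ((l.zipIdx (n + 1)).filterMap (fun ce => if ce.1 = none then some ce.2 else none))
    = ((l.zipIdx n).filterMap (fun ce => if ce.1 = none then some ce.2 else none)).map (· + 1) := by
  intro l
  induction l with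
  | nil => intro n; simp
  | cons o t ih =>
    intro n
    cases o <;> simp [List.zipIdx_cons, ih (n + 1)]

def pvCuts (l : List (Option Char)) : List Nat :=
  l.zipIdx.filterMap (fun ce => if ce.1 = none then some ce.2 else none)

-- shifting both slice bounds by one past a cons leaves the slices unchanged
theorem pv_shift (o : Option Char) (t : List (Option Char)) (l1 l2 : List Nat) :
    ((l1.map (· + 1)).zip (l2.map (· + 1))).map
      (fun se => (((o :: t).drop se.1).take (se.2 - se.1)).filterMap id)
    = (l1.zip l2).map (fun se => ((t.drop se.1).take (se.2 - se.1)).filterMap id) := by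
  rw [List.zip_map, List.map_map]
  apply List.map_congr_left
  intro se _
  simp [Nat.succ_sub_succ]

-- Stage 3: B's cut/slice construction produces exactly the pieces.
theorem pv_stage3 : ∀ (l : List (Option Char)),
    ((0 :: (pvCuts l).map (· + 1)).zip (pvCuts l ++ [l.length])).map
      (fun se => ((l.drop se.1).take (se.2 - se.1)).filterMap id)
    = pvSegsFrom [] l := by
  intro l
  induction l with
  | nil => simp [pvCuts, pvSegsFrom]
  | cons o t ih =>
    cases o with
    | none =>
      have hc : pvCuts (none :: t) = 0 :: (pvCuts t).map (· + 1) := by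
        simp [pvCuts, List.zipIdx_cons, pv_cuts_shift t 0]
      have h2 : (pvCuts t).map (· + 1) ++ [(none :: t).length] = (pvCuts t ++ [t.length]).map (· + 1) := by
        simp
      rw [show pvSegsFrom [] (none :: t) = [] :: pvSegsFrom [] t from rfl, ← ih, hc,
        List.cons_append, List.zip_cons_cons, List.map_cons, h2, pv_shift]
      congr 1
    | some c =>
      have hc : pvCuts (some c :: t) = (pvCuts t).map (· + 1) := by
        simp [pvCuts, List.zipIdx_cons, pv_cuts_shift t 0]
      have h2 : (pvCuts t).map (· + 1) ++ [(some c :: t).length] = (pvCuts t ++ [t.length]).map (· + 1) := by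
        simp
      obtain ⟨e0, er, he⟩ : ∃ e0 er, pvCuts t ++ [t.length] = e0 :: er := by
        cases pvCuts t <;> exact ⟨_, _, rfl⟩
      have hI := ih
      rw [he, List.zip_cons_cons, List.map_cons] at hI
      rw [show pvSegsFrom [] (some c :: t) = pvSegsFrom [c] t from rfl, pvSegsFrom_eq t [c], ← hI,
        hc, h2, he, List.map_cons, List.zip_cons_cons, List.map_cons, pv_shift]
      congr 1

-- ===== VERDICT (by name: the statement is the Claim_ definition above) =====
theorem commonSubstrings_spec : Claim_equal_commonSubstrings := by
  intro x L a _ _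
  simp only [Spec_commonSubstrings, commonSubstrings, commonSubstrings_alt]
  rw [pv_stage1 x.toList L a ([], [])]
  rw [pv_stage2 x.toList L a [] []]
  simp only [List.nil_append]
  rw [show (a.map (fun p => if p.1 = "no-op" then some (PySem.List.pyGetD x.toList (p.2 - 1) ' ') else none)) = pvChars x.toList a from rfl]
  rw [show (pvChars x.toList a).zipIdx.filterMap (fun ce => if ce.1 = none then some ce.2 else none) = pvCuts (pvChars x.toList a) from rfl]
  simp only [PySem.List.slice_natCast]
  rw [show (fun se : Nat × Nat => String.ofList ((((pvChars x.toList a).drop se.1).take (se.2 - se.1)).filterMap id))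
        = String.ofList ∘ (fun se : Nat × Nat => ((((pvChars x.toList a).drop se.1).take (se.2 - se.1)).filterMap id)) from rfl]
  rw [← List.map_map, pv_stage3 (pvChars x.toList a), List.filter_map]
  congr 1
  apply List.filter_congr
  intro p _
  simp
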